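-- pv_equiv track=rewrite | github.com/Kongchengfung/Kongchengfung | AI_Assignment_2/iengine.py | tt_check_all_count
-- ===== SOURCE A (Python) =====
-- def tt_check_all_count(kb, query, symbols, model):
--     if not symbols:
--         if pl_true(kb, model):
--             return 1 if pl_true([query], model) else 0
--         return 0
--     else:
--         P = symbols[0]
--         rest = symbols[1:]
--         model_true = model.copy()
--         model_false = model.copy()
--         model_true[P] = True
--         model_false[P] = False
--         return (tt_check_all_count(kb, query, rest, model_true) +
--                 tt_check_all_count(kb, query, rest, model_false))
--
-- def pl_true(clauses, model):
--     for clause in clauses: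
--         if "=>" in clause:
--             premises, conclusion = map(str.strip, clause.split("=>"))
--             premise_list = [p.strip() for p in premises.split("&")]
--             # If all premises are true, then conclusion must be true
--             if all(model.get(p, False) for p in premise_list):
--                 if not model.get(conclusion, False):
--                     return False
--         else:
--             # Atomic fact must be true
--             if not model.get(clause.strip(), False):
--                 return False
--     return True
-- ===== SOURCE B (Python) =====
-- def tt_check_all_count(kb, query, symbols, model):
--     # Iterative breadth-first enumeration: build the list of all completed
--     # models by repeatedly extending each partial model with both values of
--     # the next symbol, then count those satisfying KB and query.
--     assignments = [dict(model)]
--     for s in symbols: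
--         assignments = [{**m, s: v} for m in assignments for v in (True, False)]
--     count = 0
--     for m in assignments:
--         if pl_true(kb, m) and pl_true([query], m):
--             count += 1
--     return count
--
-- def pl_true(clauses, model):
--     for clause in clauses:
--         if "=>" in clause:
--             premises, conclusion = map(str.strip, clause.split("=>"))
--             premise_list = [p.strip() for p in premises.split("&")]
--             if all(model.get(p, False) for p in premise_list):
--                 if not model.get(conclusion, False):
--                     return False
--         else:
--             if not model.get(clause.strip(), False):
--                 return False
--     return True
-- ===== Notes on version B (the rewrite author's own statement) =====
-- stated objective: alternative
-- what changed: Replaces A's binary recursion over the symbol list with an iterative breadth-first construction of the list of all completed models (extending each partial model with both truth values of each symbol in turn) followed by a single counting pass; pl_true is kept unchanged.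
-- outside the precondition, e.g. on tt_check_all_count(['a', 'b=>c=>d'], 'a', [], {}): A returns 0, B returns 0
import Mathlib
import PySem

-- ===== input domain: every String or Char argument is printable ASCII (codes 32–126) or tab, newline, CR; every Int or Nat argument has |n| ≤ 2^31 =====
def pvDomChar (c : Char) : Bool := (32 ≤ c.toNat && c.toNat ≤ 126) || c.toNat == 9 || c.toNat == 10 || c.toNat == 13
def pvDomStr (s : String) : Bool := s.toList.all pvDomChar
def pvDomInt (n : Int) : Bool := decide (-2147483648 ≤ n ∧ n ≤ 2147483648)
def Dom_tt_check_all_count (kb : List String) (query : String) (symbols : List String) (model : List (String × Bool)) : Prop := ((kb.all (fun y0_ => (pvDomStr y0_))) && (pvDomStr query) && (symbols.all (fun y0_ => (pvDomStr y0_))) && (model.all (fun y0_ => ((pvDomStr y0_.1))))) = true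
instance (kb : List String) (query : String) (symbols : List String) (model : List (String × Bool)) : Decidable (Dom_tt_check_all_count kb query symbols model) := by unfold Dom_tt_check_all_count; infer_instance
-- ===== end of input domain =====

-- B replaces A's binary recursion over the symbol list by an iterative breadth-first
-- construction of the list of all completed models followed by a single counting pass
-- (alternative decomposition, same asymptotic cost).


-- ===== PORT A =====
-- shared module helper pl_true (used unchanged by both A and B, as in the Python sources)
def plTrue (clauses : List String) (model : PySem.Dict String Bool) : Bool :=
  match clauses with
  | [] => true
  | clause :: rest =>
    if PySem.Str.isIn "=>" clause then
      match ((PySem.Str.split? clause "=>").getD []).map PySem.Str.strip with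
      | [premises, conclusion] =>
        let premiseList := ((PySem.Str.split? premises "&").getD []).map PySem.Str.strip
        if premiseList.all (fun p => model.getD p false) then
          if !(model.getD conclusion false) then false else plTrue rest model
        else plTrue rest model
      | _ => false  -- Python raises ValueError here (clause with ≥ 2 "=>"); excluded by Pre_
    else
      if !(model.getD (PySem.Str.strip clause) false) then false else plTrue rest model

def ttcaA (kb : List String) (query : String) : List String → PySem.Dict String Bool → Int
  | [], model => if plTrue kb model then (if plTrue [query] model then 1 else 0) else 0
  | P :: rest, model =>
      ttcaA kb query rest (model.insert P true) + ttcaA kb query rest (model.insert P false)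

def tt_check_all_count (kb : List String) (query : String) (symbols : List String) (model : List (String × Bool)) : Int :=
  ttcaA kb query symbols ⟨model⟩

-- ===== PORT B =====
def ttcaB (kb : List String) (query : String) (symbols : List String) (model : PySem.Dict String Bool) : Int :=
  let assignments := symbols.foldl
    (fun acc s => acc.flatMap (fun m => [m.insert s true, m.insert s false])) [model]
  assignments.foldl (fun c m => if plTrue kb m && plTrue [query] m then c + 1 else c) 0

def tt_check_all_count_alt (kb : List String) (query : String) (symbols : List String) (model : List (String × Bool)) : Int :=
  ttcaB kb query symbols ⟨model⟩

-- ===== PRECONDITION & SPEC =====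
-- Pre_ excludes inputs where kb or the query contains a clause with two or more "=>"
-- separators: on such inputs A's tuple unpacking of clause.split("=>") raises ValueError
-- whenever that clause is reached during evaluation (it still returns on those where an
-- earlier clause short-circuits pl_true first — excluded together, see claim cites).
def Pre_tt_check_all_count (kb : List String) (query : String) (_symbols : List String) (_model : List (String × Bool)) : Prop :=
  (∀ c ∈ kb, PySem.Str.count c "=>" ≤ 1) ∧ PySem.Str.count query "=>" ≤ 1
instance (kb : List String) (query : String) (symbols : List String) (model : List (String × Bool)) : Decidable (Pre_tt_check_all_count kb query symbols model) := by unfold Pre_tt_check_all_count; infer_instance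

def pvWitness_tt_check_all_count : List String × String × List String × (List (String × Bool)) :=
  (["a & b => c", "a"], "c", ["a", "b", "c"], [("a", true)])

def Spec_tt_check_all_count (kb : List String) (query : String) (symbols : List String) (model : List (String × Bool)) (out : Int) : Prop := out = tt_check_all_count_alt kb query symbols model
instance (kb : List String) (query : String) (symbols : List String) (model : List (String × Bool)) (out : Int) : Decidable (Spec_tt_check_all_count kb query symbols model out) := by unfold Spec_tt_check_all_count; infer_instance

-- ===== CLAIM (what is proved, stated in full; the proofs are below) =====
def Claim_equal_tt_check_all_count : Prop := ∀ (kb : List String) (query : String) (symbols : List String) (model : List (String × Bool)), Dom_tt_check_all_count kb query symbols model → Pre_tt_check_all_count kb query symbols model → Spec_tt_check_all_count kb query symbols model (tt_check_all_count kb query symbols model)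

-- ===== LEMMAS AND PROOFS =====

theorem sum_flatMap_int {α : Type} (l : List α) (g : α → List Int) :
    (l.flatMap g).sum = (l.map (fun a => (g a).sum)).sum := by
  induction l with
  | nil => simp
  | cons x xs ih => simp [List.flatMap_cons, ih]

-- A's recursion at [] is the 0/1 indicator of "kb and query both true".
theorem ttcaA_nil (kb : List String) (query : String) (m : PySem.Dict String Bool) :
    ttcaA kb query [] m = if plTrue kb m && plTrue [query] m then 1 else 0 := by
  simp only [ttcaA]
  cases plTrue kb m <;> cases plTrue [query] m <;> simp

-- Loop invariant: counting over the breadth-first extension of any list of partial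
-- models equals the sum of A's recursive counts over those partial models.
theorem countP_foldl_extend (kb : List String) (query : String) :
    ∀ (symbols : List String) (acc : List (PySem.Dict String Bool)),
      (((symbols.foldl
            (fun acc s => acc.flatMap (fun m => [m.insert s true, m.insert s false])) acc).countP
          (fun m => plTrue kb m && plTrue [query] m) : Nat) : Int)
        = (acc.map (fun m => ttcaA kb query symbols m)).sum := by
  intro symbols
  induction symbols with
  | nil =>
    intro acc
    simp only [List.foldl_nil]
    rw [← PySem.List.sum_map_ite_one_zero (fun m => plTrue kb m && plTrue [query] m) acc]
    congr 1
    exact List.map_congr_left (fun m _ => (ttcaA_nil kb query m).symm)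
  | cons s rest ih =>
    intro acc
    simp only [List.foldl_cons]
    rw [ih]
    rw [List.map_flatMap, sum_flatMap_int]
    congr 1
    refine List.map_congr_left (fun m _ => ?_)
    simp [ttcaA]

-- ===== VERDICT (by name: the statement is the Claim_ definition above) =====
theorem tt_check_all_count_spec : Claim_equal_tt_check_all_count := by
  intro kb query symbols model _hdom _hpre
  show tt_check_all_count kb query symbols model = tt_check_all_count_alt kb query symbols model
  unfold tt_check_all_count tt_check_all_count_alt ttcaB
  rw [PySem.List.foldl_if_add_one (fun m => plTrue kb m && plTrue [query] m)]
  rw [countP_foldl_extend kb query symbols [⟨model⟩]]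
  simp
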